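-- pv_equiv track=rewrite | github.com/yys-1423/Artificial-Defect-Data-Driven-Training-of-LLMs-for-Fault-Localization | check_correctness_single.py | get_buggy_rank
-- ===== SOURCE A (Python) =====
-- def get_buggy_rank(sorted_methods, buggy_class, buggy_method, buggy_line):
--     """
--     Finds the minimum rank of the actual buggy method in the sorted fault localization results.
--
--     Parameters:
--       sorted_methods: List of sorted methods, each as [Classname, MethodName, Lineno].
--       buggy_class: List of buggy class names.
--       buggy_method: List of buggy method names.
--       buggy_line: List of buggy line numbers.
--
--     Returns:
--       Minimum rank of the buggy method in sorted_methods (1-based index). If no match, returns None.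
--     """
--
--     # Convert buggy info into a list of tuples
--     buggy_methods = []
--     for cls, method, line in zip(buggy_class, buggy_method, buggy_line):
--         if method == "@@" and line == "@@":
--             # Bug of omission: Only match the class name
--             buggy_methods.append((cls, None, None))
--         else:
--             # Normal case: Match full class, method, and line number
--             buggy_methods.append((cls, method, str(line)))  # Normalize line number as string
--
--     # Find the minimum rank
--     min_rank = 100
--
--     for rank, method in enumerate(sorted_methods, start=1):  # 1-based index
--         class_name, method_name, line_no = method
--         line_no = str(line_no)  # Normalize line number
--
--         for buggy_cls, buggy_mtd, buggy_ln in buggy_methods: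
--             if buggy_mtd is None and buggy_ln is None:
--                 # Bug of omission case: Only class name needs to match
--                 if class_name == buggy_cls:
--                     min_rank = min(min_rank, rank)
--             else:
--                 # Normal case: Full match required
--                 if class_name == buggy_cls and method_name == buggy_mtd and line_no == buggy_ln:
--                     min_rank = min(min_rank, rank)
--
--     return min_rank  # Return None if no match found
-- ===== SOURCE B (Python) =====
-- def get_buggy_rank(sorted_methods, buggy_class, buggy_method, buggy_line):
--     # Invert A's nested scan: one pass over sorted_methods builds two indexes
--     # (setdefault keeps the FIRST = minimum rank, since ranks ascend), then each
--     # buggy entry is a single dictionary query.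
--     full_index = {}
--     class_index = {}
--     for rank, (cls, mtd, ln) in enumerate(sorted_methods, start=1):
--         full_index.setdefault((cls, mtd, str(ln)), rank)
--         class_index.setdefault(cls, rank)
--     best = 100
--     for cls, mtd, ln in zip(buggy_class, buggy_method, buggy_line):
--         if mtd == "@@" and ln == "@@":
--             r = class_index.get(cls)
--         else:
--             r = full_index.get((cls, mtd, str(ln)))
--         if r is not None and r < best:
--             best = r
--     return best
-- ===== Notes on version B (the rewrite author's own statement) =====
-- stated objective: faster
-- what changed: B inverts A's nested scan: one pass over sorted_methods builds two dictionaries (full signature -> first rank, class -> first rank, setdefault keeping the minimum since ranks ascend), then each buggy entry becomes a single hash lookup instead of being re-scanned against every sorted method.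
import Mathlib
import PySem

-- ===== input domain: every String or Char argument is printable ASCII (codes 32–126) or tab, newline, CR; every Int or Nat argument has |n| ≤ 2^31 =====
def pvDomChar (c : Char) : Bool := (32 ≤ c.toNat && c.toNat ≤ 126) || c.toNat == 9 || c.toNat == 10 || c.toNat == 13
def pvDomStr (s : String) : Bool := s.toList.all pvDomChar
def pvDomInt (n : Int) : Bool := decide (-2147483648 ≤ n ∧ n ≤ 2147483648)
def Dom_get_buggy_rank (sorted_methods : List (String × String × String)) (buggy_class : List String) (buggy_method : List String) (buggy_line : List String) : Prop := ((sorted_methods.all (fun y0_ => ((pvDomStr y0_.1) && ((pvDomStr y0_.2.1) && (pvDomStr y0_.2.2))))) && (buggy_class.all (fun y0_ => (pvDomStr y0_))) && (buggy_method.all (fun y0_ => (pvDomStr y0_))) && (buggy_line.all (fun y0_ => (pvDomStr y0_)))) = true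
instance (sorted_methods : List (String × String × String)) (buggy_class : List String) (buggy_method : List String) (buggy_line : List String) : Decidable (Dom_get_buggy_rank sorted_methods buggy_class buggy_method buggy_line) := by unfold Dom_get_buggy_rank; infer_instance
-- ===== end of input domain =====

-- B inverts A's nested scan: it indexes sorted_methods once into two dictionaries
-- (first = minimum rank per key) and answers each buggy entry by a lookup; return
-- values proved equal.

-- ===== PORT A =====
-- the 'buggy_methods' list A builds from the zipped buggy info ('str(line)' is the identity here: lines are strings)
def pvBuggyMethodsA : List (String × String × String) → List (String × Option String × Option String)
  | [] => []
  | z :: rest =>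
    (if z.2.1 == "@@" && z.2.2 == "@@" then (z.1, none, none) else (z.1, some z.2.1, some z.2.2))
      :: pvBuggyMethodsA rest

-- A's inner loop over buggy_methods for one ranked method ('x == None' in Python is 'some _ == none' here: false)
def pvInnerA (class_name method_name line_no : String) (rank : Int)
    (bms : List (String × Option String × Option String)) (min_rank : Int) : Int :=
  bms.foldl (fun mr bm =>
    if bm.2.1 == none && bm.2.2 == none then
      if class_name == bm.1 then min mr rank else mr
    else
      if class_name == bm.1 && some method_name == bm.2.1 && some line_no == bm.2.2 then
        min mr rank
      else mr) min_rank

-- A's outer loop: enumerate(sorted_methods, start=1)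
def pvLoopA (bms : List (String × Option String × Option String)) :
    List (String × String × String) → Int → Int → Int
  | [], _, mr => mr
  | m :: rest, rank, mr => pvLoopA bms rest (rank + 1) (pvInnerA m.1 m.2.1 m.2.2 rank bms mr)

def get_buggy_rank (sorted_methods : List (String × String × String)) (buggy_class : List String) (buggy_method : List String) (buggy_line : List String) : Int :=
  pvLoopA (pvBuggyMethodsA (buggy_class.zip (buggy_method.zip buggy_line))) sorted_methods 1 100

-- ===== PORT B =====
-- the indexing pass: for rank, (cls, mtd, ln) in enumerate(sorted_methods, 1):
--   full_index.setdefault((cls, mtd, str(ln)), rank); class_index.setdefault(cls, rank)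
def pvBuildB (sorted_methods : List (String × String × String)) :
    PySem.Dict (String × String × String) Int × PySem.Dict String Int :=
  (PySem.List.enumerate sorted_methods 1).foldl
    (fun st p => (st.1.setdefault p.2 p.1, st.2.setdefault p.2.1 p.1))
    (PySem.Dict.empty, PySem.Dict.empty)

-- the query pass over zip(buggy_class, buggy_method, buggy_line)
def pvQueryB (fi : PySem.Dict (String × String × String) Int) (ci : PySem.Dict String Int)
    (zs : List (String × String × String)) : Int :=
  zs.foldl (fun best z =>
    match (if z.2.1 == "@@" && z.2.2 == "@@" then ci.get? z.1 else fi.get? z) with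
    | some r => if r < best then r else best
    | none => best) 100

def get_buggy_rank_alt (sorted_methods : List (String × String × String)) (buggy_class : List String) (buggy_method : List String) (buggy_line : List String) : Int :=
  let st := pvBuildB sorted_methods
  pvQueryB st.1 st.2 (buggy_class.zip (buggy_method.zip buggy_line))

-- ===== PRECONDITION & SPEC =====
def Spec_get_buggy_rank (sorted_methods : List (String × String × String)) (buggy_class : List String) (buggy_method : List String) (buggy_line : List String) (out : Int) : Prop := out = get_buggy_rank_alt sorted_methods buggy_class buggy_method buggy_line
instance (sorted_methods : List (String × String × String)) (buggy_class : List String) (buggy_method : List String) (buggy_line : List String) (out : Int) : Decidable (Spec_get_buggy_rank sorted_methods buggy_class buggy_method buggy_line out) := by unfold Spec_get_buggy_rank; infer_instance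

-- ===== CLAIM (what is proved, stated in full; the proofs are below) =====
def Claim_equal_get_buggy_rank : Prop := ∀ (sorted_methods : List (String × String × String)) (buggy_class : List String) (buggy_method : List String) (buggy_line : List String), Dom_get_buggy_rank sorted_methods buggy_class buggy_method buggy_line → Spec_get_buggy_rank sorted_methods buggy_class buggy_method buggy_line (get_buggy_rank sorted_methods buggy_class buggy_method buggy_line)

-- ===== LEMMAS AND PROOFS =====

-- 'method m matches buggy entry z' (what both programs test for one pair)
def pvHitOne (z m : String × String × String) : Bool :=
  if z.2.1 == "@@" && z.2.2 == "@@" then m.1 == z.1 else m == z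

-- 'method m matches some buggy entry of zs'
def pvHitAny : List (String × String × String) → (String × String × String) → Bool
  | [], _ => false
  | z :: zs, m => pvHitOne z m || pvHitAny zs m

-- rank (starting at r) of the first element of the list satisfying p
def pvFirst (p : (String × String × String) → Bool) :
    List (String × String × String) → Int → Option Int
  | [], _ => none
  | m :: rest, r => if p m then some r else pvFirst p rest (r + 1)

-- min of an Int and an optional Int, in the shape B's query loop uses
def pvOMin (b : Int) : Option Int → Int
  | some r => if r < b then r else b
  | none => b

theorem pvFirst_congr (p q : (String × String × String) → Bool)
    (xs : List (String × String × String)) (h : ∀ m ∈ xs, p m = q m) :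
    ∀ r, pvFirst p xs r = pvFirst q xs r := by
  induction xs with
  | nil => intro r; rfl
  | cons m rest ih =>
    intro r
    rw [pvFirst, pvFirst, h m List.mem_cons_self,
      ih (fun x hx => h x (List.mem_cons_of_mem _ hx))]

theorem pvFirst_ge (p : (String × String × String) → Bool) :
    ∀ (xs : List (String × String × String)) (r v : Int),
      pvFirst p xs r = some v → r ≤ v := by
  intro xs
  induction xs with
  | nil => intro r v h; simp [pvFirst] at h
  | cons m rest ih =>
    intro r v h
    rw [pvFirst] at h
    by_cases hp : p m = true
    · rw [if_pos hp] at h; injection h with h'; omega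
    · rw [if_neg hp] at h; have := ih (r + 1) v h; omega

-- first rank of a disjunction = the smaller of the two first ranks
theorem pvFirst_or (p q : (String × String × String) → Bool) :
    ∀ (xs : List (String × String × String)) (r : Int),
      pvFirst (fun m => p m || q m) xs r =
        match pvFirst p xs r, pvFirst q xs r with
        | some a, some b => some (min a b)
        | some a, none => some a
        | none, ob => ob := by
  intro xs
  induction xs with
  | nil => intro r; rfl
  | cons m rest ih =>
    intro r
    rw [pvFirst, pvFirst, pvFirst]
    by_cases hp : p m = true
    · rw [if_pos (by simp [hp]), if_pos hp]
      by_cases hq : q m = true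
      · rw [if_pos hq]; simp
      · rw [if_neg hq]
        cases hqf : pvFirst q rest (r + 1) with
        | none => rfl
        | some b =>
          have := pvFirst_ge q rest (r + 1) b hqf
          simp only []
          have : min r b = r := by omega
          rw [this]
    · rw [if_neg hp]
      by_cases hq : q m = true
      · rw [if_pos (by simp [hp, hq]), if_pos hq]
        cases hpf : pvFirst p rest (r + 1) with
        | none => rfl
        | some a =>
          have := pvFirst_ge p rest (r + 1) a hpf
          simp only []
          have : min a r = r := by omega
          rw [this]
      · rw [if_neg (by simp [hp, hq]), if_neg hq, ih]

-- A's inner loop computes: min with rank iff m hits zs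
theorem pvInnerA_eq (zs : List (String × String × String)) (m : String × String × String)
    (rank : Int) : ∀ mr, pvInnerA m.1 m.2.1 m.2.2 rank (pvBuggyMethodsA zs) mr =
      if pvHitAny zs m then min mr rank else mr := by
  induction zs with
  | nil => intro mr; simp [pvInnerA, pvBuggyMethodsA, pvHitAny]
  | cons z zs ih =>
    intro mr
    by_cases hz : (z.2.1 == "@@" && z.2.2 == "@@") = true
    · have hbm : pvBuggyMethodsA (z :: zs) = (z.1, none, none) :: pvBuggyMethodsA zs := by
        simp [pvBuggyMethodsA, hz]
      have step : pvInnerA m.1 m.2.1 m.2.2 rank ((z.1, none, none) :: pvBuggyMethodsA zs) mr =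
          pvInnerA m.1 m.2.1 m.2.2 rank (pvBuggyMethodsA zs)
            (if m.1 == z.1 then min mr rank else mr) := by
        simp [pvInnerA]
      rw [hbm, step, ih]
      rw [pvHitAny, pvHitOne, if_pos hz]
      by_cases hc : (m.1 == z.1) = true <;> by_cases hh : pvHitAny zs m = true <;>
        simp [hc, hh]
    · have hbm : pvBuggyMethodsA (z :: zs) = (z.1, some z.2.1, some z.2.2) :: pvBuggyMethodsA zs := by
        simp only [pvBuggyMethodsA, hz]; simp
      have step : pvInnerA m.1 m.2.1 m.2.2 rank
            ((z.1, some z.2.1, some z.2.2) :: pvBuggyMethodsA zs) mr =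
          pvInnerA m.1 m.2.1 m.2.2 rank (pvBuggyMethodsA zs)
            (if m.1 == z.1 && m.2.1 == z.2.1 && m.2.2 == z.2.2 then min mr rank else mr) := by
        simp [pvInnerA]
      rw [hbm, step, ih]
      rw [pvHitAny, pvHitOne, if_neg hz]
      have hmz : (m == z) = (m.1 == z.1 && m.2.1 == z.2.1 && m.2.2 == z.2.2) := by
        cases m with | mk m1 m2 => cases m2 with | mk m21 m22 =>
        cases z with | mk z1 z2 => cases z2 with | mk z21 z22 =>
        rw [show ((m1, m21, m22) == (z1, z21, z22)) =
          (m1 == z1 && (m21 == z21 && m22 == z22)) from rfl, Bool.and_assoc]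
      rw [← hmz]
      by_cases hc : (m == z) = true <;> by_cases hh : pvHitAny zs m = true <;>
        simp [hc, hh]

-- once min_rank ≤ rank, A's loop can no longer change it
theorem pvLoopA_stable (zs : List (String × String × String)) :
    ∀ (sorted : List (String × String × String)) (rank mr : Int), mr ≤ rank →
      pvLoopA (pvBuggyMethodsA zs) sorted rank mr = mr := by
  intro sorted
  induction sorted with
  | nil => intro rank mr _; rfl
  | cons m rest ih =>
    intro rank mr hle
    rw [pvLoopA, pvInnerA_eq]
    have heq : (if pvHitAny zs m then min mr rank else mr) = mr := by
      split_ifs <;> omega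
    rw [heq]
    exact ih (rank + 1) mr (by omega)

-- A's outer loop = min of the start value and the FIRST rank hitting zs
theorem pvLoopA_eq_first (zs : List (String × String × String)) :
    ∀ (sorted : List (String × String × String)) (rank mr : Int),
      pvLoopA (pvBuggyMethodsA zs) sorted rank mr =
        pvOMin mr (pvFirst (pvHitAny zs) sorted rank) := by
  intro sorted
  induction sorted with
  | nil => intro rank mr; rfl
  | cons m rest ih =>
    intro rank mr
    rw [pvLoopA, pvInnerA_eq, pvFirst]
    by_cases hh : pvHitAny zs m = true
    · rw [if_pos hh, if_pos hh]
      rw [pvLoopA_stable zs rest (rank + 1) (min mr rank) (by omega)]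
      rw [pvOMin]
      split_ifs <;> omega
    · rw [if_neg hh, if_neg hh, ih]

-- lookup in a setdefault-indexing loop = what the start dict has, else the first matching rank
theorem pvSetdefault_get (key : (String × String × String) → String × String × String) :
    ∀ (xs : List (String × String × String)) (r : Int)
      (d : PySem.Dict (String × String × String) Int) (k : String × String × String),
      ((PySem.List.enumerate xs r).foldl (fun d p => d.setdefault (key p.2) p.1) d).get? k =
        match d.get? k with
        | some v => some v
        | none => pvFirst (fun m => key m == k) xs r := by
  intro xs
  induction xs with
  | nil =>
    intro r d k
    rw [PySem.List.enumerate_nil]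
    cases hg : d.get? k <;> simp [hg, pvFirst]
  | cons m rest ih =>
    intro r d k
    rw [PySem.List.enumerate_cons, List.foldl_cons, ih, pvFirst]
    by_cases hk : (key m == k) = true
    · have hkk : key m = k := by exact eq_of_beq hk
      rw [if_pos hk]
      by_cases hc : d.contains (key m) = true
      · rw [PySem.Dict.setdefault_of_contains _ _ hc]
        have : (d.get? k).isSome := by
          rw [← hkk, ← PySem.Dict.contains_eq_isSome_get?, hc]
        cases hg : d.get? k with
        | none => rw [hg] at this; simp at this
        | some v => rfl
      · rw [PySem.Dict.setdefault_of_not_contains _ _ (by simp [hc]),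
          PySem.Dict.get?_insert, if_pos hkk.symm]
        have : d.get? k = none := by
          rw [← hkk]
          rcases hg : d.get? (key m) with _ | v
          · rfl
          · exfalso
            have := PySem.Dict.contains_eq_isSome_get? d (key m)
            rw [hg] at this; simp [this] at hc
        rw [this]
    · rw [if_neg hk]
      have hne : k ≠ key m := fun h => by simp [h] at hk
      by_cases hc : d.contains (key m) = true
      · rw [PySem.Dict.setdefault_of_contains _ _ hc]
      · rw [PySem.Dict.setdefault_of_not_contains _ _ (by simp [hc]),
          PySem.Dict.get?_insert, if_neg hne]

-- same for the class index (a String-keyed dict)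
theorem pvSetdefaultS_get (key : (String × String × String) → String) :
    ∀ (xs : List (String × String × String)) (r : Int)
      (d : PySem.Dict String Int) (k : String),
      ((PySem.List.enumerate xs r).foldl (fun d p => d.setdefault (key p.2) p.1) d).get? k =
        match d.get? k with
        | some v => some v
        | none => pvFirst (fun m => key m == k) xs r := by
  intro xs
  induction xs with
  | nil =>
    intro r d k
    rw [PySem.List.enumerate_nil]
    cases hg : d.get? k <;> simp [hg, pvFirst]
  | cons m rest ih =>
    intro r d k
    rw [PySem.List.enumerate_cons, List.foldl_cons, ih, pvFirst]
    by_cases hk : (key m == k) = true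
    · have hkk : key m = k := by exact eq_of_beq hk
      rw [if_pos hk]
      by_cases hc : d.contains (key m) = true
      · rw [PySem.Dict.setdefault_of_contains _ _ hc]
        have : (d.get? k).isSome := by
          rw [← hkk, ← PySem.Dict.contains_eq_isSome_get?, hc]
        cases hg : d.get? k with
        | none => rw [hg] at this; simp at this
        | some v => rfl
      · rw [PySem.Dict.setdefault_of_not_contains _ _ (by simp [hc]),
          PySem.Dict.get?_insert, if_pos hkk.symm]
        have : d.get? k = none := by
          rw [← hkk]
          rcases hg : d.get? (key m) with _ | v
          · rfl
          · exfalso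
            have := PySem.Dict.contains_eq_isSome_get? d (key m)
            rw [hg] at this; simp [this] at hc
        rw [this]
    · rw [if_neg hk]
      have hne : k ≠ key m := fun h => by simp [h] at hk
      by_cases hc : d.contains (key m) = true
      · rw [PySem.Dict.setdefault_of_contains _ _ hc]
      · rw [PySem.Dict.setdefault_of_not_contains _ _ (by simp [hc]),
          PySem.Dict.get?_insert, if_neg hne]

-- a fold updating a pair componentwise is the pair of the two folds
theorem pvFoldlPair {α β γ : Type} (f : β → α → β) (g : γ → α → γ) :
    ∀ (l : List α) (b : β) (c : γ),
      l.foldl (fun st p => (f st.1 p, g st.2 p)) (b, c) = (l.foldl f b, l.foldl g c) := by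
  intro l
  induction l with
  | nil => intro b c; rfl
  | cons p rest ih => intro b c; rw [List.foldl_cons, List.foldl_cons, List.foldl_cons]; exact ih _ _

-- the joint fold building both dicts is the pair of the two single folds
theorem pvBuildB_eq (sorted : List (String × String × String)) :
    pvBuildB sorted =
      ((PySem.List.enumerate sorted 1).foldl (fun d p => d.setdefault p.2 p.1) PySem.Dict.empty,
       (PySem.List.enumerate sorted 1).foldl (fun d p => d.setdefault p.2.1 p.1) PySem.Dict.empty) := by
  rw [pvBuildB]
  exact pvFoldlPair
    (fun (d : PySem.Dict (String × String × String) Int) (p : Int × String × String × String) =>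
      d.setdefault p.2 p.1)
    (fun (d : PySem.Dict String Int) (p : Int × String × String × String) =>
      d.setdefault p.2.1 p.1) _ _ _

-- B's dict lookups answer pvFirst of the corresponding one-entry hit predicates
theorem pvBuildB_full (sorted : List (String × String × String)) (k : String × String × String) :
    (pvBuildB sorted).1.get? k = pvFirst (fun m => m == k) sorted 1 := by
  rw [pvBuildB_eq]
  have := pvSetdefault_get (fun m => m) sorted 1 PySem.Dict.empty k
  simpa [PySem.Dict.get?_empty] using this

theorem pvBuildB_class (sorted : List (String × String × String)) (c : String) :
    (pvBuildB sorted).2.get? c = pvFirst (fun m => m.1 == c) sorted 1 := by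
  rw [pvBuildB_eq]
  have := pvSetdefaultS_get (fun m => m.1) sorted 1 PySem.Dict.empty c
  simpa [PySem.Dict.get?_empty] using this

-- pvOMin over the min-of-options associates the way the two loops need
theorem pvOMin_assoc (mr : Int) (a b : Option Int) :
    pvOMin mr (match a, b with
      | some x, some y => some (min x y)
      | some x, none => some x
      | none, ob => ob) = pvOMin (pvOMin mr a) b := by
  cases a <;> cases b <;> simp only [pvOMin] <;> split_ifs <;> omega

-- A's characterization folds into B's per-entry query loop
theorem pvFold_eq (sorted : List (String × String × String)) :
    ∀ (zs : List (String × String × String)) (mr : Int),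
      pvOMin mr (pvFirst (pvHitAny zs) sorted 1) =
        zs.foldl (fun best z =>
          match (if z.2.1 == "@@" && z.2.2 == "@@"
                 then (pvBuildB sorted).2.get? z.1 else (pvBuildB sorted).1.get? z) with
          | some r => if r < best then r else best
          | none => best) mr := by
  intro zs
  induction zs with
  | nil =>
    intro mr
    rw [List.foldl_nil]
    have h1 : pvFirst (pvHitAny []) sorted 1 = none := by
      have : ∀ r, pvFirst (pvHitAny []) sorted r = none := by
        induction sorted with
        | nil => intro r; rfl
        | cons m rest ih => intro r; rw [pvFirst]; simp [pvHitAny]; exact ih (r + 1)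
      exact this 1
    rw [h1]; rfl
  | cons z zs ih =>
    intro mr
    rw [List.foldl_cons]
    have hsplit : pvFirst (pvHitAny (z :: zs)) sorted 1 =
        match pvFirst (pvHitOne z) sorted 1, pvFirst (pvHitAny zs) sorted 1 with
        | some a, some b => some (min a b)
        | some a, none => some a
        | none, ob => ob := by
      rw [pvFirst_congr (pvHitAny (z :: zs)) (fun m => pvHitOne z m || pvHitAny zs m)
        sorted (fun m _ => rfl) 1]
      exact pvFirst_or (pvHitOne z) (pvHitAny zs) sorted 1
    rw [hsplit, pvOMin_assoc, ih]
    have hlook : (if z.2.1 == "@@" && z.2.2 == "@@"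
        then (pvBuildB sorted).2.get? z.1 else (pvBuildB sorted).1.get? z) =
        pvFirst (pvHitOne z) sorted 1 := by
      by_cases hz : (z.2.1 == "@@" && z.2.2 == "@@") = true
      · rw [if_pos hz, pvBuildB_class]
        exact pvFirst_congr _ _ sorted (fun m _ => by rw [pvHitOne, if_pos hz]) 1
      · rw [if_neg hz, pvBuildB_full]
        exact pvFirst_congr _ _ sorted (fun m _ => by rw [pvHitOne, if_neg hz]) 1
    rw [hlook]
    cases pvFirst (pvHitOne z) sorted 1 <;> rfl

-- ===== VERDICT (by name: the statement is the Claim_ definition above) =====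
theorem get_buggy_rank_spec : Claim_equal_get_buggy_rank := by
  intro sorted_methods buggy_class buggy_method buggy_line _
  unfold Spec_get_buggy_rank get_buggy_rank get_buggy_rank_alt pvQueryB
  rw [pvLoopA_eq_first, pvFold_eq]
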